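-- pv_equiv track=rewrite | github.com/FornoDiPietra/TAMPC | measurements/testrx.py | parseCommandLineArguments
-- ===== SOURCE A (Python) =====
-- def parseCommandLineArguments(argv, validArgs):
--     newArg = []
--     arglist = []
--     for a in argv[1:]:
--         if (a in validArgs):
--             arglist.append(newArg)
--             newArg = []
--             newArg.append(a)
--         else:
--             newArg.append(a)
--
--     arglist.append(newArg)
--     del arglist[0]
--     return arglist
-- ===== SOURCE B (Python) =====
-- def parseCommandLineArguments(argv, validArgs):
--     args = argv[1:]
--     starts = [i for i, a in enumerate(args) if a in validArgs]
--     ends = starts[1:] + [len(args)]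
--     return [args[s:e] for s, e in zip(starts, ends)]
-- ===== Notes on version B (the rewrite author's own statement) =====
-- stated objective: alternative
-- what changed: Replaces the stateful accumulator loop with its dummy leading group and del-trick by computing the flag positions first and then slicing the argument list between consecutive flag positions.
import Mathlib
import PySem

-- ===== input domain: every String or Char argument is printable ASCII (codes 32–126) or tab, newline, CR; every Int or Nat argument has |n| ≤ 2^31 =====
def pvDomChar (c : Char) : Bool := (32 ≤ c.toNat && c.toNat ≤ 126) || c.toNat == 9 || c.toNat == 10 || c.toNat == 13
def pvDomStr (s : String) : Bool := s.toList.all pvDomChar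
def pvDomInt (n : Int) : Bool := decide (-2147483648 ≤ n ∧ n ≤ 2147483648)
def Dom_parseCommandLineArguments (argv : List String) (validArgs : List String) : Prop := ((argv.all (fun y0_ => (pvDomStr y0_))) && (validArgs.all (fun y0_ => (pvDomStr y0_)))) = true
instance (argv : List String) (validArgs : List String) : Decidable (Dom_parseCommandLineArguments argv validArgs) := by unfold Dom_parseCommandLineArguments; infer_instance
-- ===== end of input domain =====

-- B replaces A's stateful accumulator loop (dummy leading group + del) by computing the
-- flag positions and slicing between consecutive flags; alternative decomposition, same cost.

-- B replaces A's stateful accumulator loop (dummy leading group + del-trick) by first computing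
-- the flag positions and then slicing the argument list between consecutive flag positions;
-- alternative decomposition, same cost.

-- ===== PORT A =====
-- the loop keeps (arglist, newArg); the final 'del arglist[0]' is .drop 1 (arglist is never empty there)
def parseCommandLineArguments (argv : List String) (validArgs : List String) : List (List String) :=
  let st := (PySem.List.slice argv (some 1) none).foldl
    (fun (st : List (List String) × List String) (a : String) =>
      if validArgs.contains a then (st.1 ++ [st.2], [a]) else (st.1, st.2 ++ [a]))
    ([], [])
  (st.1 ++ [st.2]).drop 1

-- ===== PORT B =====
def parseCommandLineArguments_alt (argv : List String) (validArgs : List String) : List (List String) :=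
  let args := PySem.List.slice argv (some 1) none
  let starts := ((PySem.List.enumerate args 0).filter (fun p => validArgs.contains p.2)).map Prod.fst
  let ends := PySem.List.slice starts (some 1) none ++ [(args.length : Int)]
  (starts.zip ends).map (fun p => PySem.List.slice args (some p.1) (some p.2))

-- ===== PRECONDITION & SPEC =====
def Spec_parseCommandLineArguments (argv : List String) (validArgs : List String) (out : List (List String)) : Prop := out = parseCommandLineArguments_alt argv validArgs
instance (argv : List String) (validArgs : List String) (out : List (List String)) : Decidable (Spec_parseCommandLineArguments argv validArgs out) := by unfold Spec_parseCommandLineArguments; infer_instance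

-- ===== CLAIM (what is proved, stated in full; the proofs are below) =====
def Claim_equal_parseCommandLineArguments : Prop := ∀ (argv : List String) (validArgs : List String), Dom_parseCommandLineArguments argv validArgs → Spec_parseCommandLineArguments argv validArgs (parseCommandLineArguments argv validArgs)

-- ===== LEMMAS AND PROOFS =====

def fsplit (flag : String → Bool) : List String → List String × List (List String)
  | [] => ([], [])
  | a :: rest =>
    let r := fsplit flag rest
    if flag a then ([], (a :: r.1) :: r.2) else (a :: r.1, r.2)

def natStarts (flag : String → Bool) : List String → List Nat
  | [] => []
  | a :: rest =>
    if flag a then 0 :: (natStarts flag rest).map (· + 1)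
    else (natStarts flag rest).map (· + 1)

def gB (args : List String) (s : List Nat) : List (List String) :=
  (s.zip (s.drop 1 ++ [args.length])).map (fun p => (args.drop p.1).take (p.2 - p.1))

theorem foldlA (flag : String → Bool) (args : List String) :
    ∀ acc cur,
      (let st := args.foldl
        (fun (st : List (List String) × List String) (a : String) =>
          if flag a then (st.1 ++ [st.2], [a]) else (st.1, st.2 ++ [a])) (acc, cur);
       st.1 ++ [st.2])
      = acc ++ (cur ++ (fsplit flag args).1) :: (fsplit flag args).2 := by
  induction args with
  | nil => intro acc cur; simp [fsplit]
  | cons a rest ih =>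
    intro acc cur
    cases h : flag a <;>
      simp only [List.foldl_cons, fsplit, h, if_true, if_false, Bool.false_eq_true] <;>
      simp [ih]


theorem mapShift (L : List Nat) (s : Int) :
    (L.map (· + 1)).map (fun n : Nat => s + (n : Int)) = L.map (fun n : Nat => (s + 1) + (n : Int)) := by
  induction L with
  | nil => rfl
  | cons x t ih => simp only [List.map_cons, ih]; congr 1; push_cast; ring

theorem startsB (flag : String → Bool) (args : List String) :
    ∀ s : Int,
      ((PySem.List.enumerate args s).filter (fun p => flag p.2)).map Prod.fst
      = (natStarts flag args).map (fun n : Nat => s + (n : Int)) := by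
  induction args with
  | nil => intro s; simp [PySem.List.enumerate_nil, natStarts]
  | cons a rest ih =>
    intro s
    cases h : flag a <;>
      simp only [PySem.List.enumerate_cons, List.filter_cons, h, Bool.false_eq_true, if_true,
        if_false, List.map_cons, ih (s + 1), natStarts, mapShift]
    all_goals simp

theorem gB_shift (a : String) (rest : List String) (s : List Nat) :
    gB (a :: rest) (s.map (· + 1)) = gB rest s := by
  unfold gB
  have h1 : (s.map (· + 1)).drop 1 = (s.drop 1).map (· + 1) := (List.map_drop ..).symm
  have h2 : (s.drop 1).map (· + 1) ++ [(a :: rest).length]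
      = ((s.drop 1) ++ [rest.length]).map (· + 1) := by simp
  rw [h1, h2, List.zip_map]
  rw [List.map_map]
  congr 1
  funext p
  simp [Nat.add_sub_add_right]

theorem natStarts_nil (flag : String → Bool) (args : List String)
    (h : natStarts flag args = []) : fsplit flag args = (args, []) := by
  induction args with
  | nil => simp [fsplit]
  | cons a rest ih =>
    cases hf : flag a
    · simp only [natStarts, hf, Bool.false_eq_true, if_false, List.map_eq_nil_iff] at h
      simp [fsplit, hf, ih h]
    · simp [natStarts, hf] at h

theorem natStarts_head (flag : String → Bool) (args : List String) :
    ∀ i s, natStarts flag args = i :: s → args.take i = (fsplit flag args).1 := by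
  induction args with
  | nil => intro i s h; simp [natStarts] at h
  | cons a rest ih =>
    intro i s h
    cases hf : flag a
    · simp only [natStarts, hf, Bool.false_eq_true, if_false] at h
      cases hN : natStarts flag rest with
      | nil => rw [hN] at h; simp at h
      | cons i0 s0 =>
        rw [hN, List.map_cons] at h
        obtain ⟨rfl, -⟩ := List.cons.injEq .. ▸ (h : _)
        simp only [fsplit, hf, Bool.false_eq_true, if_false, List.take_succ_cons]
        rw [ih i0 _ hN]
    · simp only [natStarts, hf, if_true, List.cons.injEq] at h
      rw [← h.1]
      simp [fsplit, hf]

theorem gB_eq_fsplit (flag : String → Bool) (args : List String) :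
    gB args (natStarts flag args) = (fsplit flag args).2 := by
  induction args with
  | nil => simp [natStarts, gB, fsplit]
  | cons a rest ih =>
    cases hf : flag a
    · simp only [natStarts, hf, Bool.false_eq_true, if_false]
      rw [gB_shift, ih]
      simp [fsplit, hf]
    · simp only [natStarts, hf, if_true]
      cases hS : natStarts flag rest with
      | nil =>
        have hrest := natStarts_nil flag rest hS
        simp [gB, fsplit, hf, hrest, List.take_succ_cons]
      | cons i0 S2 =>
        have htk : rest.take i0 = (fsplit flag rest).1 := natStarts_head flag rest i0 S2 hS
        have htail : gB (a :: rest) ((natStarts flag rest).map (· + 1)) = (fsplit flag rest).2 := by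
          rw [gB_shift, ih]
        rw [hS, List.map_cons] at htail
        unfold gB at htail ⊢
        simp only [List.drop_succ_cons, List.drop_zero, List.zip_cons_cons, List.map_cons,
          List.cons_append] at htail ⊢
        rw [htail]
        simp [fsplit, hf, List.take_succ_cons, htk]

theorem altB (flag : String → Bool) (args : List String) :
    (let starts := ((PySem.List.enumerate args 0).filter (fun p => flag p.2)).map Prod.fst
     let ends := PySem.List.slice starts (some 1) none ++ [(args.length : Int)]
     (starts.zip ends).map (fun p => PySem.List.slice args (some p.1) (some p.2)))
    = gB args (natStarts flag args) := by
  simp only [startsB flag args 0]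
  have h0 : (natStarts flag args).map (fun n : Nat => (0 : Int) + (n : Int))
      = (natStarts flag args).map (fun n : Nat => (n : Int)) := by simp
  rw [h0, PySem.List.slice_from_one]
  have h1 : ((natStarts flag args).map (fun n : Nat => (n : Int))).tail
      = ((natStarts flag args).drop 1).map (fun n : Nat => (n : Int)) := by
    rw [← List.drop_one, ← List.map_drop]
  have h2 : ((natStarts flag args).drop 1).map (fun n : Nat => (n : Int)) ++ [(args.length : Int)]
      = ((natStarts flag args).drop 1 ++ [args.length]).map (fun n : Nat => (n : Int)) := by simp
  rw [h1, h2, List.zip_map, List.map_map]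
  unfold gB
  congr 1
  funext p
  cases p
  simp [PySem.List.slice_natCast]


-- ===== VERDICT (by name: the statement is the Claim_ definition above) =====
theorem parseCommandLineArguments_spec : Claim_equal_parseCommandLineArguments := by
  intro argv validArgs _
  unfold Spec_parseCommandLineArguments
  simp only [parseCommandLineArguments, parseCommandLineArguments_alt]
  rw [foldlA (fun a => validArgs.contains a) (PySem.List.slice argv (some 1) none) [] []]
  rw [altB (fun a => validArgs.contains a) (PySem.List.slice argv (some 1) none)]
  rw [gB_eq_fsplit]
  simp
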